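-- pv_equiv track=rewrite | github.com/on4r4p/BaseBreaker | old/a1z26/a1z26.py | encrypt_a1z26_en
-- ===== SOURCE A (Python) =====
-- enalphabet = ["a", "b", "c", "d", "e", "f", "g", "h", "i", "j", "k", "l", "m",
--               "n", "o", "p", "q", "r", "s", "t", "u", "v", "w", "x", "y", "z"]
--
-- def encrypt_a1z26_en(sentence):
--     result = ""
--     for character in sentence:
--         i = -1
--         if character in enalphabet:
--             for x in enalphabet:
--                 i += 1
--                 if x == character:
--                     break
--             result += "-"
--             result += str(i)
--         else:
--             result += character
--     return result
-- ===== SOURCE B (Python) =====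
-- def encrypt_a1z26_en(sentence):
--     return ''.join(
--         '-' + str(ord(c) - 97) if 'a' <= c <= 'z' else c
--         for c in sentence
--     )
-- ===== Notes on version B (the rewrite author's own statement) =====
-- stated objective: simpler
-- what changed: Replaces the 26-element alphabet list, its membership test and the inner index-hunting loop with a closed-form ord(c)-97 index inside a single join-of-generator pass.
import Mathlib
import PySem

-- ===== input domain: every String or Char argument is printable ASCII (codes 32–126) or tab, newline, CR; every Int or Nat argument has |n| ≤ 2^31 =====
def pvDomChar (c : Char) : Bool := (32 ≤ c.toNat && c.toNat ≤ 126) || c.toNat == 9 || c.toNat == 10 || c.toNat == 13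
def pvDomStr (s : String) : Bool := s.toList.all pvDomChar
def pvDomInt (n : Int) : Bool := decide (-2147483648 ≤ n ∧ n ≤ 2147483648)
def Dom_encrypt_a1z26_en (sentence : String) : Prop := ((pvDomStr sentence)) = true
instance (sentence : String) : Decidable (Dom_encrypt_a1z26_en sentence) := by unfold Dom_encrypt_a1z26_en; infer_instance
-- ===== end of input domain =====

-- B drops the alphabet list and the inner index-hunting loop for a closed-form ord(c)-97 in one join-of-map pass (simpler).

-- ===== PORT A =====
def enalphabet : List Char :=
  ['a', 'b', 'c', 'd', 'e', 'f', 'g', 'h', 'i', 'j', 'k', 'l', 'm',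
   'n', 'o', 'p', 'q', 'r', 's', 't', 'u', 'v', 'w', 'x', 'y', 'z']

-- the inner 'for x in enalphabet: i += 1; if x == character: break' loop of A
def pvScanIdx : List Char → Int → Char → Int
  | [], i, _ => i
  | x :: xs, i, c => if x == c then i + 1 else pvScanIdx xs (i + 1) c

def encrypt_a1z26_en (sentence : String) : String :=
  sentence.toList.foldl (fun result character =>
    if enalphabet.contains character then
      result ++ "-" ++ PySem.Int.toStr (pvScanIdx enalphabet (-1) character)
    else
      result ++ character.toString) ""

-- ===== PORT B =====
def encrypt_a1z26_en_alt (sentence : String) : String :=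
  String.join (sentence.toList.map (fun c =>
    if 'a' ≤ c ∧ c ≤ 'z' then "-" ++ PySem.Int.toStr ((c.toNat : Int) - 97)
    else c.toString))

-- ===== PRECONDITION & SPEC =====
def Spec_encrypt_a1z26_en (sentence : String) (out : String) : Prop := out = encrypt_a1z26_en_alt sentence
instance (sentence : String) (out : String) : Decidable (Spec_encrypt_a1z26_en sentence out) := by unfold Spec_encrypt_a1z26_en; infer_instance

-- ===== CLAIM (what is proved, stated in full; the proofs are below) =====
def Claim_equal_encrypt_a1z26_en : Prop := ∀ (sentence : String), Dom_encrypt_a1z26_en sentence → Spec_encrypt_a1z26_en sentence (encrypt_a1z26_en sentence)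

-- ===== LEMMAS AND PROOFS =====

-- A's per-character contribution
def pvStepA (c : Char) : String :=
  if enalphabet.contains c then "-" ++ PySem.Int.toStr (pvScanIdx enalphabet (-1) c)
  else c.toString

-- B's per-character contribution
def pvStepB (c : Char) : String :=
  if 'a' ≤ c ∧ c ≤ 'z' then "-" ++ PySem.Int.toStr ((c.toNat : Int) - 97)
  else c.toString

lemma range_mem (c : Char) (h1 : 'a' ≤ c) (h2 : c ≤ 'z') : c ∈ enalphabet := by
  have hlo : 97 ≤ c.toNat := by
    rw [Char.le_def] at h1; exact UInt32.le_iff_toNat_le.mp h1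
  have hhi : c.toNat ≤ 122 := by
    rw [Char.le_def] at h2; exact UInt32.le_iff_toNat_le.mp h2
  have hd : c.toNat = 97 ∨ c.toNat = 98 ∨ c.toNat = 99 ∨ c.toNat = 100 ∨ c.toNat = 101 ∨
      c.toNat = 102 ∨ c.toNat = 103 ∨ c.toNat = 104 ∨ c.toNat = 105 ∨ c.toNat = 106 ∨
      c.toNat = 107 ∨ c.toNat = 108 ∨ c.toNat = 109 ∨ c.toNat = 110 ∨ c.toNat = 111 ∨
      c.toNat = 112 ∨ c.toNat = 113 ∨ c.toNat = 114 ∨ c.toNat = 115 ∨ c.toNat = 116 ∨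
      c.toNat = 117 ∨ c.toNat = 118 ∨ c.toNat = 119 ∨ c.toNat = 120 ∨ c.toNat = 121 ∨
      c.toNat = 122 := by omega
  rcases hd with h|h|h|h|h|h|h|h|h|h|h|h|h|h|h|h|h|h|h|h|h|h|h|h|h|h <;>
    (rw [← Char.ofNat_toNat c, h]; decide)

lemma mem_range (c : Char) (hm : c ∈ enalphabet) : 'a' ≤ c ∧ c ≤ 'z' := by
  fin_cases hm <;> exact ⟨by decide, by decide⟩

lemma step_eq (c : Char) : pvStepA c = pvStepB c := by
  by_cases h : 'a' ≤ c ∧ c ≤ 'z'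
  · have hm : c ∈ enalphabet := range_mem c h.1 h.2
    fin_cases hm <;> decide
  · have hnc : ¬ enalphabet.contains c = true := by
      intro hc
      exact h (mem_range c (by simpa using hc))
    unfold pvStepA pvStepB
    rw [if_neg hnc, if_neg h]

lemma foldl_join (l : List String) (a : String) :
    l.foldl (fun r s => r ++ s) a = a ++ String.join l := by
  induction l generalizing a with
  | nil => simp [String.join]
  | cons x xs ih =>
    have hj : String.join (x :: xs) = x ++ String.join xs := by
      show List.foldl (fun r s => r ++ s) "" (x :: xs) = _
      rw [List.foldl_cons, ih]; simp
    rw [List.foldl_cons, ih, hj, String.append_assoc]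

lemma foldl_step (l : List Char) (a : String) :
    l.foldl (fun r c => r ++ pvStepA c) a = a ++ String.join (l.map pvStepA) := by
  induction l generalizing a with
  | nil => simp [String.join]
  | cons x xs ih =>
    have hj : String.join (pvStepA x :: xs.map pvStepA)
        = pvStepA x ++ String.join (xs.map pvStepA) := by
      show List.foldl (fun r s => r ++ s) "" _ = _
      rw [List.foldl_cons, foldl_join]; simp
    rw [List.map_cons, List.foldl_cons, ih, hj, String.append_assoc]

-- ===== VERDICT (by name: the statement is the Claim_ definition above) =====
theorem encrypt_a1z26_en_spec : Claim_equal_encrypt_a1z26_en := by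
  intro s _
  unfold Spec_encrypt_a1z26_en encrypt_a1z26_en encrypt_a1z26_en_alt
  have hbody : (fun (r : String) (c : Char) =>
      if enalphabet.contains c then r ++ "-" ++ PySem.Int.toStr (pvScanIdx enalphabet (-1) c)
      else r ++ c.toString) = fun r c => r ++ pvStepA c := by
    funext r c
    unfold pvStepA
    split <;> simp [String.append_assoc]
  rw [hbody, foldl_step]
  have hmap : s.toList.map pvStepA = s.toList.map (fun c =>
      if 'a' ≤ c ∧ c ≤ 'z' then "-" ++ PySem.Int.toStr ((c.toNat : Int) - 97)
      else c.toString) :=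
    List.map_congr_left (fun c _ => step_eq c)
  rw [hmap]
  simp
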